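-- pv_equiv track=rewrite | github.com/allainclair/coding | 2021/nops/main.py | get_removing_intervals
-- ===== SOURCE A (Python) =====
-- from collections import defaultdict
--
-- def get_removing_intervals(word, words):
--     removing_words = defaultdict(list)
--     for w in words:
--         index = word.find(w)
--         while index > -1:
--             start_index = index
--             end_index = index + len(w)
--             removing_words[w].append((start_index, end_index))
--             index = word.find(w, end_index)
--     return removing_words
-- ===== SOURCE B (Python) =====
-- def get_removing_intervals(word, words):
--     # Collect ALL occurrence positions per pattern in one comprehension, then
--     # greedily keep the non-overlapping ones; build the result dict per pattern.
--     n = len(word)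
--     out = {}
--     for w in words:
--         m = len(w)
--         starts = [i for i in range(n - m + 1) if word[i:i + m] == w]
--         picked = []
--         last_end = 0
--         for i in starts:
--             if i >= last_end:
--                 picked.append((i, i + m))
--                 last_end = i + m
--         if picked:
--             out[w] = out.get(w, []) + picked
--     return out
-- ===== Notes on version B (the rewrite author's own statement) =====
-- stated objective: alternative
-- what changed: B replaces A's interleaved str.find/while loop (which restarts the search after each match) by a per-pattern comprehension collecting ALL occurrence positions via slice comparison, followed by a separate greedy pass keeping the non-overlapping ones, and builds each dict entry with one extend instead of per-match defaultdict appends.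
import Mathlib
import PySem

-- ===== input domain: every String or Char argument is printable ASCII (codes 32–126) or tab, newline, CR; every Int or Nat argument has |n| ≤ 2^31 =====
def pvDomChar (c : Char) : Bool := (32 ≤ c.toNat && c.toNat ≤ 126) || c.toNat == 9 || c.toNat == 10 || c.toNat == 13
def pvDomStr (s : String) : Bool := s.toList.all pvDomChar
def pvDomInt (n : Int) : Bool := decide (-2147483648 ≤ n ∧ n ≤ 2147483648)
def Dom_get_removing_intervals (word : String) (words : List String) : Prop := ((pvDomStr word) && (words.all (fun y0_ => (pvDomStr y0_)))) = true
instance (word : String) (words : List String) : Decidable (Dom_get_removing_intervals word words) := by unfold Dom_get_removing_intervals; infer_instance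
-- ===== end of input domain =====

-- B collects all occurrence positions per pattern and greedily filters overlaps,
-- instead of A's restart-after-match str.find loop (alternative decomposition, same cost).


-- ===== PORT A =====
-- A's inner 'while index > -1' loop. The while loop is encoded with fuel
-- len(word)+1, which strictly exceeds the number of iterations whenever the
-- pattern w is nonempty (the Pre_ domain); for an empty w Python's loop never
-- terminates (word.find('', e) = e forever), which Pre_ excludes.
def pvALoop (word w : String) (d : PySem.Dict String (List (Int × Int))) (index : Int) :
    Nat → PySem.Dict String (List (Int × Int))
  | 0 => d
  | fuel + 1 =>
    if index > -1 then
      let start_index := index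
      let end_index := index + PySem.Str.len w
      pvALoop word w (d.modify w [] (fun l => l ++ [(start_index, end_index)]))
        (PySem.Str.findFrom word w end_index none) fuel
    else d

def get_removing_intervals (word : String) (words : List String) : List (String × List (Int × Int)) :=
  (words.foldl (fun d w => pvALoop word w d (PySem.Str.find word w) (word.toList.length + 1))
    PySem.Dict.empty).items

-- ===== PORT B =====
-- starts = [i for i in range(n - m + 1) if word[i:i+m] == w]
def pvStarts (word w : String) : List Int :=
  (PySem.List.pyRange 0 (PySem.Str.len word - PySem.Str.len w + 1) 1).filter
    (fun i => PySem.Str.slice word (some i) (some (i + PySem.Str.len w)) == w)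

-- the greedy pass: picked/last_end accumulator over starts
def pvPick (m : Int) (starts : List Int) : List (Int × Int) :=
  (starts.foldl
    (fun acc i => if acc.2 ≤ i then (acc.1 ++ [(i, i + m)], i + m) else acc)
    (([] : List (Int × Int)), (0 : Int))).1

def get_removing_intervals_alt (word : String) (words : List String) : List (String × List (Int × Int)) :=
  (words.foldl
    (fun out w =>
      let picked := pvPick (PySem.Str.len w) (pvStarts word w)
      if picked.isEmpty then out else out.insert w (out.getD w [] ++ picked))
    PySem.Dict.empty).items

-- ===== PRECONDITION & SPEC =====
-- Pre_ excludes inputs with an empty-string pattern: on those Python's A never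
-- returns (word.find('', end) = end, so the while loop runs forever).
def Pre_get_removing_intervals (word : String) (words : List String) : Prop :=
  ∀ w ∈ words, w ≠ ""
instance (word : String) (words : List String) : Decidable (Pre_get_removing_intervals word words) := by
  unfold Pre_get_removing_intervals; infer_instance

def pvWitness_get_removing_intervals : String × List String := ("abcab", ["ab", "c", "xy"])

def Spec_get_removing_intervals (word : String) (words : List String) (out : List (String × List (Int × Int))) : Prop := out = get_removing_intervals_alt word words
instance (word : String) (words : List String) (out : List (String × List (Int × Int))) : Decidable (Spec_get_removing_intervals word words out) := by unfold Spec_get_removing_intervals; infer_instance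

-- ===== CLAIM (what is proved, stated in full; the proofs are below) =====
def Claim_equal_get_removing_intervals : Prop := ∀ (word : String) (words : List String), Dom_get_removing_intervals word words → Pre_get_removing_intervals word words → Spec_get_removing_intervals word words (get_removing_intervals word words)

-- ===== LEMMAS AND PROOFS =====

-- A's loop, emitted intervals only (Chars level)
def pvAP (cs ws : List Char) : Int → Nat → List (Int × Int)
  | _, 0 => []
  | idx, fuel + 1 =>
    if idx > -1 then
      (idx, idx + (ws.length : Int)) ::
        pvAP cs ws (PySem.Chars.findFrom cs ws (idx + (ws.length : Int)) none) fuel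
    else []

-- B's greedy pass as structural recursion
def pvGre (m : Int) : List Int → Int → List (Int × Int)
  | [], _ => []
  | i :: t, e => if e ≤ i then (i, i + m) :: pvGre m t (i + m) else pvGre m t e

-- all match positions ≥ k (Chars level)
def pvMF (cs ws : List Char) (k : Int) : List Int :=
  (PySem.List.pyRange k ((cs.length : Int) - ws.length + 1) 1).filter
    (fun i => PySem.List.slice cs (some i) (some (i + (ws.length : Int))) == ws)

lemma pvPick_eq_gre (m : Int) (l : List Int) :
    ∀ (acc : List (Int × Int)) (e : Int),
      (l.foldl (fun acc i => if acc.2 ≤ i then (acc.1 ++ [(i, i + m)], i + m) else acc) (acc, e)).1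
        = acc ++ pvGre m l e := by
  induction l with
  | nil => intro acc e; simp [pvGre]
  | cons i t ih =>
    intro acc e
    simp only [List.foldl_cons, pvGre]
    by_cases h : e ≤ i
    · simp [h, ih]
    · simp [h, ih]

lemma pvALoop_eq_AP (word w : String) :
    ∀ (fuel : Nat) (idx : Int) (d : PySem.Dict String (List (Int × Int))),
      pvALoop word w d idx fuel
        = (pvAP word.toList w.toList idx fuel).foldl
            (fun d p => d.modify w [] (fun l => l ++ [p])) d := by
  intro fuel
  induction fuel with
  | zero => intro idx d; simp [pvALoop, pvAP]
  | succ f ih =>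
    intro idx d
    by_cases h : idx > -1
    · simp only [pvALoop, pvAP, if_pos h, List.foldl_cons]
      rw [ih]
      simp [PySem.Str.findFrom_eq, PySem.Str.len]
    · simp [pvALoop, pvAP, if_neg h]

lemma pvFoldModify (k : String) (l : List (Int × Int)) :
    ∀ (d : PySem.Dict String (List (Int × Int))), l ≠ [] →
      l.foldl (fun d p => d.modify k [] (fun v => v ++ [p])) d
        = d.insert k (d.getD k [] ++ l) := by
  induction l with
  | nil => intro d h; exact absurd rfl h
  | cons p t ih =>
    intro d _
    have hmod : ∀ (d : PySem.Dict String (List (Int × Int))) (p : Int × Int),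
        d.modify k [] (fun v => v ++ [p]) = d.insert k (d.getD k [] ++ [p]) := fun _ _ => rfl
    rcases eq_or_ne t [] with rfl | ht
    · simp [hmod]
    · rw [List.foldl_cons, hmod, ih _ ht, PySem.Dict.getD_insert_self,
        PySem.Dict.insert_insert_self, List.append_assoc, List.singleton_append]

lemma pvPred_iff (cs ws : List Char) (i : Nat) :
    ((PySem.List.slice cs (some (i : Int)) (some ((i : Int) + (ws.length : Int))) == ws) = true
      ↔ ws <+: cs.drop i) := by
  rw [PySem.List.slice_natCast_add, beq_iff_eq, List.prefix_iff_eq_take]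
  constructor
  · intro h; rw [← h]; congr 1; rw [h]
  · intro h; rw [← h]

lemma pvAP_neg_one (cs ws : List Char) (fuel : Nat) : pvAP cs ws (-1) fuel = [] := by
  cases fuel <;> simp [pvAP]

lemma pvMatch_le (cs ws : List Char) (hm : ws ≠ []) (j : Nat) (h : ws <+: cs.drop j) :
    j + ws.length ≤ cs.length := by
  have hl := h.length_le
  rw [List.length_drop] at hl
  by_cases hj : j ≤ cs.length
  · omega
  · rw [List.drop_eq_nil_of_le (by omega)] at h
    exact absurd (List.prefix_nil.mp h) hm

lemma pvInfix_drop (cs ws : List Char) (e : Nat) :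
    ws <:+: cs.drop e ↔ ∃ j, e ≤ j ∧ ws <+: cs.drop j := by
  rw [← PySem.Chars.isIn_iff_infix, ← PySem.Chars.exists_prefix_drop_iff_isIn]
  constructor
  · rintro ⟨j', hj'⟩
    exact ⟨e + j', by omega, by rwa [List.drop_drop] at hj'⟩
  · rintro ⟨j, hj, hp⟩
    refine ⟨j - e, ?_⟩
    rw [List.drop_drop]
    have h2 : e + (j - e) = j := by omega
    rwa [h2]

lemma pvNoMatch (cs ws : List Char) (e : Nat) (he : e ≤ cs.length)
    (h : ∀ j, e ≤ j → ¬ ws <+: cs.drop j) :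
    PySem.Chars.findFrom cs ws (e : Int) none = -1 := by
  rw [PySem.Chars.findFrom_natCast_eq_neg_one_iff cs ws e he]
  intro hin
  obtain ⟨j, hj, hp⟩ := (pvInfix_drop cs ws e).mp hin
  exact h j hj hp

lemma pvFirst (cs ws : List Char) (e k : Nat) (he : e ≤ cs.length) (hek : e ≤ k)
    (hk : ws <+: cs.drop k) (hmin : ∀ j, e ≤ j → j < k → ¬ ws <+: cs.drop j) :
    PySem.Chars.findFrom cs ws (e : Int) none = (k : Int) := by
  have hne : PySem.Chars.findFrom cs ws (e : Int) none ≠ -1 := by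
    rw [ne_eq, PySem.Chars.findFrom_natCast_eq_neg_one_iff cs ws e he, not_not]
    exact (pvInfix_drop cs ws e).mpr ⟨k, hek, hk⟩
  obtain ⟨h1, h2, h3⟩ := PySem.Chars.findFrom_natCast_spec cs ws e he hne
  set r := PySem.Chars.findFrom cs ws (e : Int) none with hr
  have hr0 : 0 ≤ r := le_trans (by exact_mod_cast Nat.zero_le e) h1
  have hre : e ≤ r.toNat := by omega
  rcases lt_trichotomy r.toNat k with hlt | heq | hgt
  · exact absurd h2 (hmin r.toNat hre hlt)
  · omega
  · exact absurd hk (h3 k hek hgt)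

lemma pvG_nil (cs ws : List Char) (hm : ws ≠ []) (k e : Nat) (he : e ≤ cs.length)
    (hb : (cs.length : Int) - ws.length + 1 ≤ (k : Int))
    (H : ∀ j : Nat, e ≤ j → j < k → ¬ ws <+: cs.drop j) (fuel : Nat) :
    pvAP cs ws (PySem.Chars.findFrom cs ws (e : Int) none) fuel
      = pvGre (ws.length : Int) (pvMF cs ws (k : Int)) (e : Int) := by
  have hmf : pvMF cs ws (k : Int) = [] := by
    unfold pvMF
    rw [PySem.List.pyRange_one_eq_nil hb, List.filter_nil]
  rw [hmf, pvNoMatch cs ws e he, pvAP_neg_one]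
  · rfl
  · intro j hj hp
    have hle := pvMatch_le cs ws hm j hp
    have hjk : j < k := by
      have : (j : Int) < (cs.length : Int) - ws.length + 1 := by
        have : 1 ≤ ws.length := List.length_pos_iff.mpr hm
        omega
      omega
    exact H j hj hjk hp

lemma pvG (cs ws : List Char) (hm : ws ≠ []) :
    ∀ (c k e fuel : Nat),
      cs.length + 1 - k ≤ c →
      e ≤ cs.length →
      (∀ j : Nat, e ≤ j → j < k → ¬ ws <+: cs.drop j) →
      cs.length - k < fuel →
      pvAP cs ws (PySem.Chars.findFrom cs ws (e : Int) none) fuel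
        = pvGre (ws.length : Int) (pvMF cs ws (k : Int)) (e : Int) := by
  intro c
  induction c with
  | zero =>
    intro k e fuel hc he H hfuel
    have hm1 : 1 ≤ ws.length := List.length_pos_iff.mpr hm
    exact pvG_nil cs ws hm k e he (by omega) H fuel
  | succ c ih =>
    intro k e fuel hc he H hfuel
    have hm1 : 1 ≤ ws.length := List.length_pos_iff.mpr hm
    by_cases hb : (k : Int) < (cs.length : Int) - ws.length + 1
    · -- k is inside the range; split mf k
      have hkn : k + ws.length ≤ cs.length := by omega
      have hcons : pvMF cs ws (k : Int)
          = if (PySem.List.slice cs (some (k : Int)) (some ((k : Int) + (ws.length : Int))) == ws)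
            then (k : Int) :: pvMF cs ws ((k : Int) + 1) else pvMF cs ws ((k : Int) + 1) := by
        unfold pvMF
        rw [PySem.List.pyRange_one_cons hb, List.filter_cons]
      have hcast : ((k : Int) + 1) = ((k + 1 : Nat) : Int) := by push_cast; ring
      by_cases hp : (PySem.List.slice cs (some (k : Int)) (some ((k : Int) + (ws.length : Int))) == ws) = true
      · have hmatch : ws <+: cs.drop k := (pvPred_iff cs ws k).mp hp
        rw [hcons, if_pos hp]
        by_cases hek : (e : Int) ≤ (k : Int)
        · -- emit
          have hekn : e ≤ k := by exact_mod_cast hek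
          have hfind : PySem.Chars.findFrom cs ws (e : Int) none = (k : Int) :=
            pvFirst cs ws e k he hekn hmatch H
          obtain ⟨f, rfl⟩ : ∃ f, fuel = f + 1 := ⟨fuel - 1, by omega⟩
          rw [hfind]
          have hcast2 : (k : Int) + (ws.length : Int) = ((k + ws.length : Nat) : Int) := by push_cast; ring
          have hih := ih (k + 1) (k + ws.length) f (by omega) (by omega)
            (fun j h1 h2 => by omega) (by omega)
          simp only [pvAP, pvGre, if_pos (show ((k:Int) > -1) by omega), if_pos hek]
          rw [hcast2, hih, hcast]
        · -- match before e: skipped by both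
          rw [pvGre, if_neg hek, hcast]
          exact ih (k + 1) e fuel (by omega) he
            (fun j h1 h2 => by
              rcases Nat.lt_succ_iff_lt_or_eq.mp h2 with h | rfl
              · exact H j h1 h
              · exact absurd (by exact_mod_cast Int.ofNat_le.mpr h1) hek)
            (by omega)
      · -- no match at k
        have hnom : ¬ ws <+: cs.drop k := fun hmm => hp ((pvPred_iff cs ws k).mpr hmm)
        rw [hcons, if_neg hp, hcast]
        exact ih (k + 1) e fuel (by omega) he
          (fun j h1 h2 => by
            rcases Nat.lt_succ_iff_lt_or_eq.mp h2 with h | rfl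
            · exact H j h1 h
            · exact hnom)
          (by omega)
    · exact pvG_nil cs ws hm k e he (by omega) H fuel

lemma pvStarts_eq_MF (word w : String) :
    pvStarts word w = pvMF word.toList w.toList 0 := by
  unfold pvStarts pvMF
  simp only [PySem.Str.len_eq]
  refine List.filter_congr (fun i _ => ?_)
  have hsl : (PySem.Str.slice word (some i) (some (i + (w.toList.length : Int)))).toList
      = PySem.List.slice word.toList (some i) (some (i + (w.toList.length : Int))) := by
    simp [PySem.Str.slice]
  rw [Bool.eq_iff_iff, beq_iff_eq, beq_iff_eq, ← String.toList_inj, hsl]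

lemma pvPerW (word w : String) (hw : w ≠ "") (d : PySem.Dict String (List (Int × Int))) :
    pvALoop word w d (PySem.Str.find word w) (word.toList.length + 1)
      = (let picked := pvPick (PySem.Str.len w) (pvStarts word w)
         if picked.isEmpty then d else d.insert w (d.getD w [] ++ picked)) := by
  have hm : w.toList ≠ [] := fun h => hw (String.toList_inj.mp (by simp [h]))
  have hfind0 : PySem.Str.find word w
      = PySem.Chars.findFrom word.toList w.toList 0 none := by
    rw [PySem.Str.find_eq, ← PySem.Chars.findFrom_zero]
  have hG := pvG word.toList w.toList hm (word.toList.length + 1) 0 0 (word.toList.length + 1)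
    (by omega) (by omega) (fun j h1 h2 => by omega) (by omega)
  simp only [Nat.cast_zero] at hG
  have hpick : pvPick (PySem.Str.len w) (pvStarts word w)
      = pvGre (w.toList.length : Int) (pvMF word.toList w.toList 0) 0 := by
    unfold pvPick
    rw [pvPick_eq_gre, pvStarts_eq_MF]
    simp
  rw [pvALoop_eq_AP, hfind0, hG]
  show _ = (if (pvPick (PySem.Str.len w) (pvStarts word w)).isEmpty then d
      else d.insert w (d.getD w [] ++ pvPick (PySem.Str.len w) (pvStarts word w)))
  rw [hpick]
  rcases eq_or_ne (pvGre (w.toList.length : Int) (pvMF word.toList w.toList 0) 0) [] with hnil | hne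
  · rw [hnil]
    simp
  · rw [pvFoldModify w _ d hne, if_neg (by simpa [List.isEmpty_iff] using hne)]

-- ===== VERDICT (by name: the statement is the Claim_ definition above) =====
theorem get_removing_intervals_spec : Claim_equal_get_removing_intervals := by
  intro word words _ hpre
  unfold Spec_get_removing_intervals get_removing_intervals get_removing_intervals_alt
  congr 1
  apply PySem.List.foldl_congr_mem
  intro d w hw
  exact pvPerW word w (hpre w hw) d
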